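-- pv_equiv track=rewrite | github.com/jayantsolanki/EPIJudgePython | epi_judge_python/12-07-smallest_subarray_covering_all_values.py | find_smallest_sequentially_covering_subset
-- ===== SOURCE A (Python) =====
-- import collections
-- from typing import List
--
-- Subarray = collections.namedtuple('Subarray', ('start', 'end'))
--
-- def find_smallest_sequentially_covering_subset(paragraph: List[str],
--                                                keywords: List[str]
--                                                ) -> Subarray:
--     Subarray = collections.namedtuple('Subarray', ('start', 'end'))
--     result = Subarray(start = -1, end = -1)
--     keywords_to_idx = {value: index for index, value in enumerate(keywords)}
--     latest_location_keywords = [-1] * len(keywords)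
--     subarray_length_per_keyword = [float('Inf')] * len(keywords)
--     shortest_subarray = float('Inf')
--     for index, word in enumerate(paragraph):
--         if word in keywords_to_idx:
--             key_index = keywords_to_idx[word]
--             latest_location_keywords[key_index] =  index
--             if key_index == 0:
--                 subarray_length_per_keyword[key_index] = 1
--             elif subarray_length_per_keyword[key_index - 1] != float('Inf'): #check to make sure that previous key was encountered
--                 distance_to_key = index - latest_location_keywords[key_index - 1]
--                 subarray_length_per_keyword[key_index] = distance_to_key + subarray_length_per_keyword[key_index - 1]
--
--             if (key_index == len(keywords) - 1 and
--                 subarray_length_per_keyword[-1] < shortest_subarray):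
--                 shortest_subarray = subarray_length_per_keyword[-1]
--                 result = Subarray(start = index - shortest_subarray + 1, end = index)
--     return result
-- ===== SOURCE B (Python) =====
-- import collections
--
-- Subarray = collections.namedtuple('Subarray', ('start', 'end'))
--
--
-- def _last_before(pos, bound):
--     # largest element of the increasing list pos that is strictly below bound
--     r = None
--     for p in pos:
--         if p < bound:
--             r = p
--         else:
--             break
--     return r
--
--
-- def find_smallest_sequentially_covering_subset(paragraph, keywords):
--     # Staged algorithm: build an inverted index of occurrence positions per
--     # keyword, then for each occurrence e of the LAST keyword reconstruct the
--     # tightest chain ending at e by walking the occurrence lists backwards,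
--     # keeping the first strictly-shortest window.
--     idx_of = {value: index for index, value in enumerate(keywords)}
--     k = len(keywords)
--     positions = [[] for _ in range(k)]
--     for i, word in enumerate(paragraph):
--         j = idx_of.get(word)
--         if j is not None:
--             positions[j].append(i)
--     best = Subarray(start=-1, end=-1)
--     best_len = None
--     if k:
--         for e in positions[k - 1]:
--             s = e
--             for j in range(k - 2, -1, -1):
--                 s = _last_before(positions[j], s)
--                 if s is None:
--                     break
--             if s is not None and (best_len is None or e - s + 1 < best_len):
--                 best_len = e - s + 1
--                 best = Subarray(start=s, end=e)
--     return best
-- ===== Notes on version B (the rewrite author's own statement) =====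
-- stated objective: alternative
-- what changed: B replaces A's rolling one-pass DP (latest-location and accumulated-length arrays updated per word) by a staged algorithm: a first pass builds an inverted index of occurrence positions per keyword, then each occurrence of the last keyword is handled independently by walking the occurrence lists backwards to reconstruct the tightest chain ending there.
import Mathlib
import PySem

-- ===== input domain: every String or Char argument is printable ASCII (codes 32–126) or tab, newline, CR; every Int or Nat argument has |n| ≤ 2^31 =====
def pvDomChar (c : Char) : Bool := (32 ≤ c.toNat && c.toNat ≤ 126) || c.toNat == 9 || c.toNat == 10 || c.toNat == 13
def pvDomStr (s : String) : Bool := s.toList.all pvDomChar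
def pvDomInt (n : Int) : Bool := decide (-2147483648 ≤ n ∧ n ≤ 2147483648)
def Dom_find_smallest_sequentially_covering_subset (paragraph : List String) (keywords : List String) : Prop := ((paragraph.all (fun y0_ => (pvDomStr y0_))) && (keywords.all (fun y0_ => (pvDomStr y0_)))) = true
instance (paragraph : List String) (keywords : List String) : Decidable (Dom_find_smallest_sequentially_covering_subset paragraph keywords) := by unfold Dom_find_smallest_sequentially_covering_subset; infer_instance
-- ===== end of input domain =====

-- B replaces A's one-pass DP by a staged algorithm (inverted occurrence index, then per-end
-- backward chain reconstruction); same return values, objective: alternative.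

-- ===== PORT A =====
-- Python's float('Inf') only ever meets integer values in A, so the length cells are
-- modelled as Option Int with none = Inf; pvLtInf is exactly Python's < on that subdomain.
-- pvKeywordsToIdx is the dict comprehension {value: index for index, value in enumerate(keywords)},
-- which both Source A and Source B build identically.
def pvLtInf (a b : Option Int) : Bool :=
  match a, b with
  | some x, some y => x < y
  | some _, none   => true
  | none,   _      => false

def pvKeywordsToIdx (keywords : List String) : PySem.Dict String Int :=
  (PySem.List.enumerate keywords 0).foldl (fun d p => d.insert p.2 p.1) PySem.Dict.empty

def pvAloop (d : PySem.Dict String Int) (nk : Int) (words : List String) (i : Int)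
    (res : Int × Int) (latest : List Int) (lens : List (Option Int)) (short : Option Int) :
    Int × Int :=
  match words with
  | [] => res
  | w :: ws =>
    match d.get? w with
    | none => pvAloop d nk ws (i + 1) res latest lens short
    | some j =>
      let latest' := PySem.List.pySetD latest j i
      let lens' :=
        if j = 0 then PySem.List.pySetD lens j (some 1)
        else if (PySem.List.pyGetD lens (j - 1) none).isSome then
          let dist := i - PySem.List.pyGetD latest' (j - 1) 0
          PySem.List.pySetD lens j
            (some (dist + (PySem.List.pyGetD lens (j - 1) none).getD 0))
        else lens
      if j = nk - 1 && pvLtInf (PySem.List.pyGetD lens' (-1) none) short then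
        let short' := PySem.List.pyGetD lens' (-1) none
        pvAloop d nk ws (i + 1) (i - short'.getD 0 + 1, i) latest' lens' short'
      else
        pvAloop d nk ws (i + 1) res latest' lens' short

def find_smallest_sequentially_covering_subset (paragraph : List String) (keywords : List String) : Int × Int :=
  pvAloop (pvKeywordsToIdx keywords) (keywords.length : Int) paragraph 0 (-1, -1)
    (List.replicate keywords.length (-1)) (List.replicate keywords.length none) none

-- ===== PORT B =====
-- _last_before's loop with its break, accumulator r
def pvLastBeforeAux (r : Option Int) (pos : List Int) (bound : Int) : Option Int :=
  match pos with
  | [] => r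
  | p :: ps => if p < bound then pvLastBeforeAux (some p) ps bound else r

def pvLastBefore (pos : List Int) (bound : Int) : Option Int :=
  pvLastBeforeAux none pos bound

-- Source B's inner 'for j in range(k-2, -1, -1)' with its break: c counts the remaining steps,
-- step c+1 reads positions[c]; called with c = k-1.
def pvWalk (positions : List (List Int)) : Nat → Int → Option Int
  | 0, s => some s
  | c + 1, s =>
    match pvLastBefore (positions.getD c []) s with
    | none => none
    | some s' => pvWalk positions c s'

-- first pass: positions[j].append(i)
def pvBuildPos (d : PySem.Dict String Int) (words : List String) (i : Int)
    (positions : List (List Int)) : List (List Int) :=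
  match words with
  | [] => positions
  | w :: ws =>
    match d.get? w with
    | none => pvBuildPos d ws (i + 1) positions
    | some j =>
      pvBuildPos d ws (i + 1)
        (PySem.List.pySetD positions j (PySem.List.pyGetD positions j [] ++ [i]))

-- second pass: 'for e in positions[k-1]' with state (best, best_len)
def pvBestFold (positions : List (List Int)) (kl : Nat) (ends : List Int)
    (best : Int × Int) (blen : Option Int) : Int × Int :=
  match ends with
  | [] => best
  | e :: es =>
    match pvWalk positions (kl - 1) e with
    | none => pvBestFold positions kl es best blen
    | some s =>
      if (match blen with
          | none => true
          | some L => decide (e - s + 1 < L)) = true then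
        pvBestFold positions kl es (s, e) (some (e - s + 1))
      else
        pvBestFold positions kl es best blen

def find_smallest_sequentially_covering_subset_alt (paragraph : List String) (keywords : List String) : Int × Int :=
  let d := pvKeywordsToIdx keywords
  let kl := keywords.length
  let positions := pvBuildPos d paragraph 0 (List.replicate kl [])
  if kl = 0 then (-1, -1)
  else pvBestFold positions kl (PySem.List.pyGetD positions ((kl : Int) - 1) []) (-1, -1) none

-- ===== PRECONDITION & SPEC =====
def Spec_find_smallest_sequentially_covering_subset (paragraph : List String) (keywords : List String) (out : Int × Int) : Prop := out = find_smallest_sequentially_covering_subset_alt paragraph keywords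
instance (paragraph : List String) (keywords : List String) (out : Int × Int) : Decidable (Spec_find_smallest_sequentially_covering_subset paragraph keywords out) := by unfold Spec_find_smallest_sequentially_covering_subset; infer_instance

-- ===== CLAIM (what is proved, stated in full; the proofs are below) =====
def Claim_equal_find_smallest_sequentially_covering_subset : Prop := ∀ (paragraph : List String) (keywords : List String), Dom_find_smallest_sequentially_covering_subset paragraph keywords → Spec_find_smallest_sequentially_covering_subset paragraph keywords (find_smallest_sequentially_covering_subset paragraph keywords)

-- ===== LEMMAS AND PROOFS =====

-- dict values are keyword indices
lemma pvFoldValues (l : List (Int × String)) : ∀ (d0 : PySem.Dict String Int) (v : Int),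
    v ∈ (l.foldl (fun d p => d.insert p.2 p.1) d0).values → v ∈ d0.values ∨ ∃ p ∈ l, v = p.1 := by
  induction l with
  | nil => intro d0 v h; exact Or.inl h
  | cons p l ih =>
    intro d0 v h
    rcases ih _ v h with h' | ⟨q, hq, rfl⟩
    · rcases PySem.Dict.mem_values_insert _ _ _ _ h' with rfl | h''
      · exact Or.inr ⟨p, by simp, rfl⟩
      · exact Or.inl h''
    · exact Or.inr ⟨q, by simp [hq]⟩

lemma pvDictVals (keywords : List String) (w : String) (j : Int)
    (h : (pvKeywordsToIdx keywords).get? w = some j) :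
    0 ≤ j ∧ j < (keywords.length : Int) := by
  have hmem : (w, j) ∈ (pvKeywordsToIdx keywords).items := PySem.Dict.mem_items_of_get?_eq_some _ h
  have hv : j ∈ (pvKeywordsToIdx keywords).values := by
    simp only [PySem.Dict.values, List.mem_map]
    exact ⟨(w, j), hmem, rfl⟩
  rcases pvFoldValues _ _ _ hv with h0 | ⟨p, hp, rfl⟩
  · simp [PySem.Dict.empty, PySem.Dict.values] at h0
  · rcases (PySem.List.mem_enumerate_iff _ _ _).mp hp with ⟨k, hk, rfl⟩
    constructor
    · simp
    · simp; omega

lemma pvGetD_set_eq {α : Type} (l : List α) (t : Nat) (v d : α) (h : t < l.length) :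
    (l.set t v).getD t d = v := by
  simp [List.getD_eq_getElem?_getD, h]

lemma pvGetD_set_ne {α : Type} (l : List α) (t u : Nat) (v d : α) (h : u ≠ t) :
    (l.set t v).getD u d = l.getD u d := by
  simp [List.getD_eq_getElem?_getD, List.getElem?_set_ne (by omega : t ≠ u)]

lemma pvGetD_last {α : Type} (l : List α) (d : α) (h : l ≠ []) :
    PySem.List.pyGetD l (-1) d = l.getD (l.length - 1) d := by
  rw [PySem.List.pyGetD_neg_one l d h, List.getLast_eq_getElem]
  have hl : 0 < l.length := List.length_pos_iff.mpr h
  simp [List.getD_eq_getElem?_getD, List.getElem?_eq_getElem (by omega : l.length - 1 < l.length)]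

-- _last_before facts
lemma pvLastBeforeAux_all_lt (pos : List Int) : ∀ (r : Option Int) (bound : Int),
    (∀ x ∈ pos, x < bound) →
    pvLastBeforeAux r pos bound = (match pos.getLast? with | none => r | some p => some p) := by
  induction pos with
  | nil => intro r bound _; rfl
  | cons p ps ih =>
    intro r bound hall
    simp only [pvLastBeforeAux, if_pos (hall p (by simp))]
    rw [ih (some p) bound (fun x hx => hall x (by simp [hx]))]
    cases hps : ps.getLast? with
    | none =>
      have : ps = [] := by cases ps <;> simp_all
      subst this; simp
    | some q =>
      have : (p :: ps).getLast? = some q := by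
        cases ps with
        | nil => simp at hps
        | cons a as => rw [List.getLast?_cons_cons]; exact hps
      simp [this]

lemma pvLastBeforeAux_append_ge (pos ex : List Int) : ∀ (r : Option Int) (bound : Int),
    (∀ x ∈ ex, bound ≤ x) →
    pvLastBeforeAux r (pos ++ ex) bound = pvLastBeforeAux r pos bound := by
  induction pos with
  | nil =>
    intro r bound hge
    cases ex with
    | nil => rfl
    | cons e es =>
      simp only [List.nil_append, pvLastBeforeAux]
      rw [if_neg (by have := hge e (by simp); omega)]
  | cons p ps ih =>
    intro r bound hge
    simp only [List.cons_append, pvLastBeforeAux]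
    split_ifs with h
    · exact ih (some p) bound hge
    · rfl

lemma pvLastBefore_lt (pos : List Int) : ∀ (bound s : Int),
    pvLastBefore pos bound = some s → s < bound := by
  have aux : ∀ (pos : List Int) (r : Option Int) (bound s : Int),
      (∀ x, r = some x → x < bound) → pvLastBeforeAux r pos bound = some s → s < bound := by
    intro pos
    induction pos with
    | nil => intro r bound s hr h; exact hr s h
    | cons p ps ih =>
      intro r bound s hr h
      simp only [pvLastBeforeAux] at h
      split_ifs at h with hp
      · exact ih (some p) bound s (by intro x hx; injection hx with hx; omega) h
      · exact hr s h
  intro bound s h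
  exact aux pos none bound s (by intro x hx; cases hx) h

-- the walk only sees elements below its bound, so suffixes of larger elements are invisible
lemma pvWalk_extend (P P' : List (List Int)) (c : Nat) (bound : Int)
    (hext : ∀ u : Nat, ∃ ex : List Int, P'.getD u [] = P.getD u [] ++ ex ∧ ∀ x ∈ ex, bound ≤ x) :
    pvWalk P' c bound = pvWalk P c bound := by
  induction c generalizing bound with
  | zero => rfl
  | succ c ih =>
    obtain ⟨ex, hex, hge⟩ := hext c
    simp only [pvWalk, pvLastBefore, hex,
      pvLastBeforeAux_append_ge (P.getD c []) ex none bound hge]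
    cases hlb : pvLastBeforeAux none (P.getD c []) bound with
    | none => rfl
    | some s' =>
      have hs' : s' < bound := pvLastBefore_lt (P.getD c []) bound s' hlb
      exact ih s' (fun u => by
        obtain ⟨ex', hex', hge'⟩ := hext u
        exact ⟨ex', hex', fun x hx => le_of_lt (lt_of_lt_of_le hs' (hge' x hx))⟩)

-- pvBuildPos only appends, and only elements ≥ i
lemma pvBuildPos_suffix (d : PySem.Dict String Int) (kl : Nat)
    (hd : ∀ w j, d.get? w = some j → 0 ≤ j ∧ j < (kl : Int)) (ws : List String) :
    ∀ (i : Int) (P : List (List Int)), 0 ≤ i → P.length = kl →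
    (pvBuildPos d ws i P).length = kl ∧
    ∀ u : Nat, ∃ ex : List Int,
      (pvBuildPos d ws i P).getD u [] = P.getD u [] ++ ex ∧ ∀ x ∈ ex, i ≤ x := by
  induction ws with
  | nil =>
    intro i P hi hP
    exact ⟨by simpa [pvBuildPos] using hP, fun u => ⟨[], by simp [pvBuildPos], by simp⟩⟩
  | cons w ws ih =>
    intro i P hi hP
    simp only [pvBuildPos]
    cases hw : d.get? w with
    | none =>
      obtain ⟨hlen, hsuf⟩ := ih (i + 1) P (by omega) hP
      refine ⟨hlen, fun u => ?_⟩
      obtain ⟨ex, hex, hge⟩ := hsuf u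
      exact ⟨ex, hex, fun x hx => by have := hge x hx; omega⟩
    | some j =>
      obtain ⟨hj0, hjlt⟩ := hd w j hw
      obtain ⟨t, rfl⟩ : ∃ t : Nat, j = (t : Int) := ⟨j.toNat, (by omega)⟩
      have ht : t < kl := by omega
      dsimp only
      rw [PySem.List.pySetD_natCast, PySem.List.pyGetD_natCast]
      obtain ⟨hlen, hsuf⟩ := ih (i + 1) (P.set t (P.getD t [] ++ [i])) (by omega) (by simp [hP])
      refine ⟨hlen, fun u => ?_⟩
      obtain ⟨ex, hex, hge⟩ := hsuf u
      by_cases hut : u = t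
      · subst hut
        refine ⟨[i] ++ ex, ?_, ?_⟩
        · rw [hex, pvGetD_set_eq P u _ [] (by omega), List.append_assoc]
        · intro x hx
          rcases List.mem_append.mp hx with hx | hx
          · simp at hx; omega
          · have := hge x hx; omega
      · refine ⟨ex, ?_, fun x hx => by have := hge x hx; omega⟩
        rw [hex, pvGetD_set_ne P t u _ [] hut]

-- the ends contributed by the remaining words
def pvEnds (d : PySem.Dict String Int) (t : Int) (ws : List String) (i : Int) : List Int :=
  match ws with
  | [] => []
  | w :: ws' =>
    if d.get? w = some t then i :: pvEnds d t ws' (i + 1) else pvEnds d t ws' (i + 1)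

lemma pvBuildPos_ends (d : PySem.Dict String Int) (kl : Nat) (hkl : 0 < kl)
    (hd : ∀ w j, d.get? w = some j → 0 ≤ j ∧ j < (kl : Int)) (ws : List String) :
    ∀ (i : Int) (P : List (List Int)), 0 ≤ i → P.length = kl →
    (pvBuildPos d ws i P).getD (kl - 1) [] = P.getD (kl - 1) [] ++ pvEnds d ((kl : Int) - 1) ws i := by
  induction ws with
  | nil => intro i P hi hP; simp [pvBuildPos, pvEnds]
  | cons w ws ih =>
    intro i P hi hP
    simp only [pvBuildPos, pvEnds]
    cases hw : d.get? w with
    | none =>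
      rw [if_neg (by simp)]
      exact ih (i + 1) P (by omega) hP
    | some j =>
      obtain ⟨hj0, hjlt⟩ := hd w j hw
      obtain ⟨t, rfl⟩ : ∃ t : Nat, j = (t : Int) := ⟨j.toNat, (by omega)⟩
      have ht : t < kl := by omega
      dsimp only
      rw [PySem.List.pySetD_natCast, PySem.List.pyGetD_natCast]
      by_cases htk : t = kl - 1
      · subst htk
        rw [if_pos (by congr 1; omega)]
        rw [ih (i + 1) _ (by omega) (by simp [hP])]
        rw [pvGetD_set_eq P (kl - 1) _ [] (by omega), List.append_assoc]
        rfl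
      · rw [if_neg (by intro hc; injection hc with hc; omega)]
        rw [ih (i + 1) _ (by omega) (by simp [hP])]
        rw [pvGetD_set_ne P t (kl - 1) _ [] (by omega)]


lemma pvMemOfLast {α : Type} (l : List α) (p : α) (h : l.getLast? = some p) : p ∈ l := by
  rcases List.getLast?_eq_some_iff.mp h with ⟨l2, rfl⟩
  simp

lemma pvGetD_set_eq2 {α : Type} (l : List α) (t : Nat) (v d : α) :
    (l.set t v).getD t d = if t < l.length then v else d := by
  split_ifs with h
  · exact pvGetD_set_eq l t v d h
  · have hnone : (l.set t v)[t]? = none := List.getElem?_eq_none (by simpa using h)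
    rw [List.getD_eq_getElem?_getD, hnone]
    rfl

-- appending one later element to one list is invisible to walks bounded below it
lemma pvWalk_push (P : List (List Int)) (t : Nat) (i : Int) (c : Nat) (bound : Int)
    (hBnd : ∀ u : Nat, ∀ x ∈ P.getD u [], 0 ≤ x ∧ x < i) (hb : bound ≤ i) :
    pvWalk (P.set t (P.getD t [] ++ [i])) c bound = pvWalk P c bound := by
  apply pvWalk_extend
  intro u
  by_cases hut : u = t
  · subst hut
    by_cases hlen : u < P.length
    · refine ⟨[i], ?_, ?_⟩
      · rw [pvGetD_set_eq P u _ [] hlen]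
      · intro x hx; simp at hx; subst hx; exact hb
    · have hPu : P.getD u [] = [] := by
        simp [List.getD_eq_getElem?_getD, List.getElem?_eq_none (by omega : P.length ≤ u)]
      refine ⟨[], ?_, by simp⟩
      rw [pvGetD_set_eq2, if_neg hlen, hPu]
      rfl
  · exact ⟨[], by rw [pvGetD_set_ne P t u _ [] hut]; simp, by simp⟩

lemma pvWalk_build (d : PySem.Dict String Int) (kl : Nat)
    (hd : ∀ w j, d.get? w = some j → 0 ≤ j ∧ j < (kl : Int)) (ws : List String)
    (i : Int) (P : List (List Int)) (c : Nat) (bound : Int)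
    (hi : 0 ≤ i) (hP : P.length = kl) (hb : bound ≤ i) :
    pvWalk (pvBuildPos d ws i P) c bound = pvWalk P c bound := by
  apply pvWalk_extend
  intro u
  obtain ⟨ex, hex, hge⟩ := (pvBuildPos_suffix d kl hd ws i P hi hP).2 u
  exact ⟨ex, hex, fun x hx => le_trans hb (hge x hx)⟩

-- the value A's lens cell must hold for keyword u (below the last), per the invariant
def pvSpecLen (P : List (List Int)) (u : Nat) : Option Int :=
  match (P.getD u []).getLast? with
  | none => none
  | some p => (pvWalk P u p).map (fun s => p - s + 1)

lemma pvSpec_stable (P : List (List Int)) (t : Nat) (i : Int) (u : Nat)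
    (hBnd : ∀ u : Nat, ∀ x ∈ P.getD u [], 0 ≤ x ∧ x < i) (hut : u ≠ t) :
    pvSpecLen (P.set t (P.getD t [] ++ [i])) u = pvSpecLen P u := by
  unfold pvSpecLen
  rw [pvGetD_set_ne P t u _ [] hut]
  cases hl : (P.getD u []).getLast? with
  | none => rfl
  | some p =>
    have hp : p < i := ((hBnd u p (pvMemOfLast _ p hl)).2)
    dsimp only
    rw [pvWalk_push P t i u p hBnd (le_of_lt hp)]

structure pvInv (kl : Nat) (i : Int) (res : Int × Int) (latest : List Int)
    (lens : List (Option Int)) (short : Option Int)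
    (best : Int × Int) (blen : Option Int) (P : List (List Int)) : Prop where
  hres : res = best
  hsb : short = blen
  hlat : latest.length = kl
  hlen : lens.length = kl
  hP : P.length = kl
  hi : 0 ≤ i
  hBnd : ∀ u : Nat, ∀ x ∈ P.getD u [], 0 ≤ x ∧ x < i
  hlast : ∀ u : Nat, u < kl → ∀ p, (P.getD u []).getLast? = some p → latest.getD u 0 = p
  hspec : ∀ u : Nat, u + 1 < kl → lens.getD u none = pvSpecLen P u
  hmono : ∀ u : Nat, u + 1 < kl → (lens.getD (u + 1) none).isSome = true →
            (lens.getD u none).isSome = true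
  hstale : ∀ L, 0 < kl → lens.getD (kl - 1) none = some L →
            ∃ S, short = some S ∧ S ≤ L

lemma pvWalk_le (P : List (List Int)) : ∀ (c : Nat) (bound s : Int),
    pvWalk P c bound = some s → s ≤ bound := by
  intro c
  induction c with
  | zero => intro bound s h; injection h with h; omega
  | succ c ih =>
    intro bound s h
    simp only [pvWalk] at h
    cases hlb : pvLastBefore (P.getD c []) bound with
    | none => rw [hlb] at h; cases h
    | some s2 =>
      rw [hlb] at h
      have h1 := pvLastBefore_lt _ _ _ hlb
      have h2 := ih s2 s h
      omega

lemma pvMain (d : PySem.Dict String Int) (kl : Nat)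
    (hd : ∀ w j, d.get? w = some j → 0 ≤ j ∧ j < (kl : Int)) :
    ∀ (ws : List String) (i : Int) (res : Int × Int) (latest : List Int)
      (lens : List (Option Int)) (short : Option Int) (best : Int × Int)
      (blen : Option Int) (P : List (List Int)),
      pvInv kl i res latest lens short best blen P →
      pvAloop d (kl : Int) ws i res latest lens short
        = pvBestFold (pvBuildPos d ws i P) kl (pvEnds d ((kl : Int) - 1) ws i) best blen := by
  intro ws
  induction ws with
  | nil =>
    intro i res latest lens short best blen P hI
    simpa [pvAloop, pvBuildPos, pvEnds, pvBestFold] using hI.hres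
  | cons w ws ih =>
    intro i res latest lens short best blen P hI
    obtain ⟨hres, hsb, hlat, hlen, hP, hi, hBnd, hlast, hspec, hmono, hstale⟩ := hI
    subst hsb
    simp only [pvAloop, pvBuildPos, pvEnds]
    cases hw : d.get? w with
    | none =>
      rw [if_neg (by simp)]
      exact ih (i + 1) res latest lens short best short P
        ⟨hres, rfl, hlat, hlen, hP, by omega,
         (fun u x hx => ⟨(hBnd u x hx).1, by have := (hBnd u x hx).2; omega⟩),
         hlast, hspec, hmono, hstale⟩
    | some j =>
      obtain ⟨hj0, hjlt⟩ := hd w j hw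
      obtain ⟨t, rfl⟩ : ∃ t : Nat, j = (t : Int) := ⟨j.toNat, by omega⟩
      have ht : t < kl := by omega
      have hkl1 : 0 < kl := by omega
      dsimp only
      simp only [PySem.List.pySetD_natCast, PySem.List.pyGetD_natCast]
      have hPt : (P.set t (P.getD t [] ++ [i])).getD t [] = P.getD t [] ++ [i] :=
        pvGetD_set_eq P t _ [] (by omega)
      have hPne : ∀ u : Nat, u ≠ t →
          (P.set t (P.getD t [] ++ [i])).getD u [] = P.getD u [] :=
        fun u hu => pvGetD_set_ne P t u _ [] hu
      have hlastt : ((P.set t (P.getD t [] ++ [i])).getD t []).getLast? = some i := by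
        rw [hPt]; exact List.getLast?_concat
      have hBnd' : ∀ u : Nat, ∀ x ∈ (P.set t (P.getD t [] ++ [i])).getD u [],
          0 ≤ x ∧ x < i + 1 := by
        intro u x hx
        by_cases hu : u = t
        · subst hu
          rw [hPt] at hx
          rcases List.mem_append.mp hx with hx | hx
          · have := hBnd u x hx; omega
          · simp at hx; omega
        · rw [hPne u hu] at hx
          have := hBnd u x hx; omega
      have hlast' : ∀ u : Nat, u < kl → ∀ p,
          ((P.set t (P.getD t [] ++ [i])).getD u []).getLast? = some p →
          (latest.set t i).getD u 0 = p := by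
        intro u hu p hp
        by_cases hut : u = t
        · subst hut
          rw [hlastt] at hp
          injection hp with hp
          rw [pvGetD_set_eq latest u i 0 (by omega), hp]
        · rw [hPne u hut] at hp
          rw [pvGetD_set_ne latest t u i 0 hut]
          exact hlast u hu p hp
      have hlensne : lens ≠ [] := List.ne_nil_of_length_pos (by omega)
      have halllt : ∀ u : Nat, ∀ x ∈ P.getD u [], x < i := fun u x hx => (hBnd u x hx).2
      have hwalkP' : ∀ c : Nat, c ≠ t →
          pvWalk (P.set t (P.getD t [] ++ [i])) (c + 1) i
            = (match (P.getD c []).getLast? with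
               | none => none
               | some p => pvWalk P c p) := by
        intro c hc
        simp only [pvWalk, pvLastBefore, hPne c hc]
        rw [pvLastBeforeAux_all_lt (P.getD c []) none i (fun x hx => halllt c x hx)]
        cases hgl : (P.getD c []).getLast? with
        | none => rfl
        | some p =>
          dsimp only
          exact pvWalk_push P t i c p hBnd (le_of_lt (halllt c p (pvMemOfLast _ p hgl)))
      by_cases hz : (t : Int) = 0
      · -- keyword 0
        obtain rfl : t = 0 := by omega
        rw [if_pos hz]
        by_cases hk1 : kl = 1
        · -- the single keyword is also the last one: a fresh window (i, i) of length 1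
          subst hk1
          have hlget : PySem.List.pyGetD (lens.set 0 (some (1 : Int))) (-1) none
              = some 1 := by
            rw [pvGetD_last _ none (by simpa using hlensne)]
            simp only [List.length_set, hlen]
            exact pvGetD_set_eq lens 0 _ none (by omega)
          have hendc : some ((0 : Nat) : Int) = some (((1 : Nat) : Int) - 1) := by norm_num
          rw [if_pos hendc, hlget]
          have hdect : decide (((0 : Nat) : Int) = ((1 : Nat) : Int) - 1) = true :=
            decide_eq_true (by norm_num)
          have hwalkFull : pvWalk (pvBuildPos d ws (i + 1)
              (P.set 0 (P.getD 0 [] ++ [i]))) (1 - 1) i = some i := rfl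
          simp only [pvBestFold, hwalkFull, hdect, Bool.true_and, Option.getD_some,
            show i - i + 1 = (1 : Int) from by omega]
          have hInvUp : pvInv 1 (i + 1) (i - 1 + 1, i) (latest.set 0 i)
              (lens.set 0 (some 1)) (some 1) (i, i) (some 1)
              (P.set 0 (P.getD 0 [] ++ [i])) := by
            refine ⟨by rw [show i - 1 + 1 = i from by omega], rfl, by simp [hlat], by simp [hlen],
              by simp [hP], by omega, hBnd', hlast',
              (fun u hu => by omega), (fun u hu => by omega), ?_⟩
            intro L h1 hL
            rw [pvGetD_set_eq lens 0 _ none (by omega)] at hL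
            injection hL with hL
            exact ⟨1, rfl, by omega⟩
          cases short with
          | none =>
            dsimp only [pvLtInf]
            rw [if_pos rfl, if_pos rfl]
            exact ih (i + 1) _ _ _ _ _ _ _ hInvUp
          | some S =>
            dsimp only [pvLtInf]
            by_cases hq' : (1 : Int) < S
            · rw [if_pos (decide_eq_true hq'), if_pos (decide_eq_true hq')]
              exact ih (i + 1) _ _ _ _ _ _ _ hInvUp
            · rw [if_neg (by simp [hq']), if_neg (by simp [hq'])]
              refine ih (i + 1) res (latest.set 0 i) (lens.set 0 (some 1)) (some S)
                best (some S) _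
                ⟨hres, rfl, by simp [hlat], by simp [hlen], by simp [hP], by omega,
                 hBnd', hlast', (fun u hu => by omega), (fun u hu => by omega), ?_⟩
              intro L h1 hL
              rw [pvGetD_set_eq lens 0 _ none (by omega)] at hL
              injection hL with hL
              exact ⟨S, rfl, by omega⟩
        · -- keyword 0 is not the last keyword (kl ≥ 2)
          have hkl2 : 2 ≤ kl := by omega
          have hendcn : ¬ (some ((0 : Nat) : Int) = some ((kl : Int) - 1)) := by
            intro hc; injection hc with hc; omega
          rw [if_neg hendcn]
          simp only [decide_eq_false (by omega : ¬ (((0 : Nat) : Int) = (kl : Int) - 1)),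
            Bool.false_and, Bool.false_eq_true, if_false]
          refine ih (i + 1) res (latest.set 0 i) (lens.set 0 (some 1)) short best short _
            ⟨hres, rfl, by simp [hlat], by simp [hlen], by simp [hP], by omega,
             hBnd', hlast', ?_, ?_, ?_⟩
          · intro u hu
            by_cases hu0 : u = 0
            · subst hu0
              rw [pvGetD_set_eq lens 0 _ none (by omega)]
              unfold pvSpecLen
              rw [hlastt]
              simp only [pvWalk, Option.map_some]
              congr 1
              omega
            · rw [pvGetD_set_ne lens 0 u _ none hu0, pvSpec_stable P 0 i u hBnd hu0]
              exact hspec u hu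
          · intro u hu h1
            by_cases hu0 : u = 0
            · subst hu0
              rw [pvGetD_set_eq lens 0 _ none (by omega)]
              rfl
            · rw [pvGetD_set_ne lens 0 (u + 1) _ none (by omega)] at h1
              rw [pvGetD_set_ne lens 0 u _ none hu0]
              exact hmono u hu h1
          · intro L hklpos hL
            rw [pvGetD_set_ne lens 0 (kl - 1) _ none (by omega)] at hL
            exact hstale L hklpos hL
      · -- keyword t = t' + 1 ≥ 1
        rw [if_neg hz]
        obtain ⟨t', rfl⟩ : ∃ t' : Nat, t = t' + 1 := ⟨t - 1, by omega⟩
        have hcast : (((t' + 1 : Nat) : Int)) - 1 = ((t' : Nat) : Int) := by push_cast; omega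
        rw [hcast, PySem.List.pyGetD_natCast lens t' none]
        cases hprev : lens.getD t' none with
        | none =>
          -- the chain below keyword t'+1 is broken: lens stays unchanged
          simp only [Option.isSome_none, Bool.false_eq_true, if_false]
          have hspec' : ∀ u : Nat, u + 1 < kl → lens.getD u none
              = pvSpecLen (P.set (t' + 1) (P.getD (t' + 1) [] ++ [i])) u := by
            intro u hu
            by_cases hut : u = t' + 1
            · subst hut
              have hlt : lens.getD (t' + 1) none = none := by
                cases hq : lens.getD (t' + 1) none with
                | none => rfl
                | some v =>
                  have hm := hmono t' (by omega)
                  rw [hq, hprev] at hm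
                  simp at hm
              rw [hlt]
              unfold pvSpecLen
              rw [hlastt]
              dsimp only
              rw [hwalkP' t' (by omega)]
              cases hgl : (P.getD t' []).getLast? with
              | none => rfl
              | some p =>
                have hs := hspec t' (by omega)
                rw [hprev] at hs
                unfold pvSpecLen at hs
                rw [hgl] at hs
                dsimp only at hs ⊢
                cases hwk : pvWalk P t' p with
                | none => rfl
                | some s => simp [hwk] at hs
            · rw [pvSpec_stable P (t' + 1) i u hBnd hut]
              exact hspec u hu
          by_cases htk : t' + 1 = kl - 1
          · -- stale or absent length at the last keyword: neither side records a window
            have hendc : some ((t' + 1 : Nat) : Int) = some ((kl : Int) - 1) := by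
              congr 1; omega
            rw [if_pos hendc]
            have hwalkFull : pvWalk (pvBuildPos d ws (i + 1)
                (P.set (t' + 1) (P.getD (t' + 1) [] ++ [i]))) (kl - 1) i = none := by
              rw [pvWalk_build d kl hd ws (i + 1) _ (kl - 1) i (by omega)
                (by simp [hP]) (by omega)]
              rw [show kl - 1 = t' + 1 from by omega, hwalkP' t' (by omega)]
              cases hgl : (P.getD t' []).getLast? with
              | none => rfl
              | some p =>
                have hs := hspec t' (by omega)
                rw [hprev] at hs
                unfold pvSpecLen at hs
                rw [hgl] at hs
                dsimp only at hs ⊢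
                cases hwk : pvWalk P t' p with
                | none => rfl
                | some s => simp [hwk] at hs
            have hnoup : (decide (((t' + 1 : Nat) : Int) = (kl : Int) - 1)
                && pvLtInf (PySem.List.pyGetD lens (-1) none) short) = false := by
              rw [pvGetD_last lens none hlensne, hlen]
              cases hq : lens.getD (kl - 1) none with
              | none => simp [pvLtInf]
              | some L =>
                obtain ⟨S, hS, hSL⟩ := hstale L hkl1 hq
                rw [hS]
                simp [pvLtInf]
                omega
            rw [hnoup]
            simp only [Bool.false_eq_true, if_false, pvBestFold, hwalkFull]
            exact ih (i + 1) res (latest.set (t' + 1) i) lens short best short _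
              ⟨hres, rfl, by simp [hlat], hlen, by simp [hP], by omega,
               hBnd', hlast', hspec', hmono, hstale⟩
          · -- an intermediate keyword with broken chain below: nothing changes
            have hendcn : ¬ (some ((t' + 1 : Nat) : Int) = some ((kl : Int) - 1)) := by
              intro hc; injection hc with hc; omega
            rw [if_neg hendcn]
            simp only [decide_eq_false
              (by omega : ¬ (((t' + 1 : Nat) : Int) = (kl : Int) - 1)),
              Bool.false_and, Bool.false_eq_true, if_false]
            exact ih (i + 1) res (latest.set (t' + 1) i) lens short best short _
              ⟨hres, rfl, by simp [hlat], hlen, by simp [hP], by omega,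
               hBnd', hlast', hspec', hmono, hstale⟩
        | some L2 =>
          -- the chain below is complete: A stores a fresh length for keyword t'+1
          simp only [Option.isSome_some, Option.getD_some, if_true]
          rw [PySem.List.pyGetD_natCast (latest.set (t' + 1) i) t' 0,
            pvGetD_set_ne latest (t' + 1) t' i 0 (by omega)]
          have hspecprev := hspec t' (by omega)
          rw [hprev] at hspecprev
          unfold pvSpecLen at hspecprev
          obtain ⟨p, hgl, hmap⟩ : ∃ p, (P.getD t' []).getLast? = some p ∧
              Option.map (fun s => p - s + 1) (pvWalk P t' p) = some L2 := by
            cases hgl : (P.getD t' []).getLast? with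
            | none => rw [hgl] at hspecprev; simp at hspecprev
            | some p => rw [hgl] at hspecprev; exact ⟨p, rfl, hspecprev.symm⟩
          obtain ⟨s, hwk, hL2⟩ := Option.map_eq_some_iff.mp hmap
          have hlatp : latest.getD t' 0 = p := hlast t' (by omega) p hgl
          rw [hlatp]
          have hsi : s < i := by
            have h1 := pvWalk_le P t' p s hwk
            have h2 := halllt t' p (pvMemOfLast _ p hgl)
            omega
          have hval : i - p + L2 = i - s + 1 := by omega
          rw [hval]
          have hwalkT : pvWalk (P.set (t' + 1) (P.getD (t' + 1) [] ++ [i])) (t' + 1) i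
              = some s := by
            rw [hwalkP' t' (by omega), hgl]
            exact hwk
          have hspec' : ∀ u : Nat, u + 1 < kl →
              (lens.set (t' + 1) (some (i - s + 1))).getD u none
                = pvSpecLen (P.set (t' + 1) (P.getD (t' + 1) [] ++ [i])) u := by
            intro u hu
            by_cases hut : u = t' + 1
            · subst hut
              rw [pvGetD_set_eq lens (t' + 1) _ none (by omega)]
              unfold pvSpecLen
              rw [hlastt]
              dsimp only
              rw [hwalkT]
              rfl
            · rw [pvGetD_set_ne lens (t' + 1) u _ none hut,
                pvSpec_stable P (t' + 1) i u hBnd hut]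
              exact hspec u hu
          have hmono' : ∀ u : Nat, u + 1 < kl →
              ((lens.set (t' + 1) (some (i - s + 1))).getD (u + 1) none).isSome = true →
              ((lens.set (t' + 1) (some (i - s + 1))).getD u none).isSome = true := by
            intro u hu h1
            by_cases hut : u = t' + 1
            · subst hut
              rw [pvGetD_set_eq lens (t' + 1) _ none (by omega)]
              rfl
            · rw [pvGetD_set_ne lens (t' + 1) u _ none hut]
              by_cases hu1 : u + 1 = t' + 1
              · rw [show u = t' from by omega, hprev]
                rfl
              · rw [pvGetD_set_ne lens (t' + 1) (u + 1) _ none hu1] at h1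
                exact hmono u hu h1
          by_cases htk : t' + 1 = kl - 1
          · -- a complete chain ends here: both sides consider the window (s, i)
            have hendc : some ((t' + 1 : Nat) : Int) = some ((kl : Int) - 1) := by
              congr 1; omega
            rw [if_pos hendc]
            have hwalkFull : pvWalk (pvBuildPos d ws (i + 1)
                (P.set (t' + 1) (P.getD (t' + 1) [] ++ [i]))) (kl - 1) i = some s := by
              rw [pvWalk_build d kl hd ws (i + 1) _ (kl - 1) i (by omega)
                (by simp [hP]) (by omega)]
              rw [show kl - 1 = t' + 1 from by omega]
              exact hwalkT
            have hlget : PySem.List.pyGetD (lens.set (t' + 1) (some (i - s + 1))) (-1) none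
                = some (i - s + 1) := by
              rw [pvGetD_last _ none (by simpa using hlensne)]
              simp only [List.length_set, hlen]
              rw [show kl - 1 = t' + 1 from by omega]
              exact pvGetD_set_eq lens (t' + 1) _ none (by omega)
            rw [hlget]
            have hdect : decide (((t' + 1 : Nat) : Int) = (kl : Int) - 1) = true :=
              decide_eq_true (by omega)
            simp only [pvBestFold, hwalkFull, hdect, Bool.true_and, Option.getD_some,
              show i - (i - s + 1) + 1 = s from by omega]
            have hInvUp : pvInv kl (i + 1) (s, i) (latest.set (t' + 1) i)
                (lens.set (t' + 1) (some (i - s + 1))) (some (i - s + 1)) (s, i)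
                (some (i - s + 1)) (P.set (t' + 1) (P.getD (t' + 1) [] ++ [i])) := by
              refine ⟨rfl, rfl, by simp [hlat], by simp [hlen], by simp [hP], by omega,
                hBnd', hlast', hspec', hmono', ?_⟩
              intro L hklpos hL
              rw [show kl - 1 = t' + 1 from by omega,
                pvGetD_set_eq lens (t' + 1) _ none (by omega)] at hL
              injection hL with hL
              exact ⟨i - s + 1, rfl, by omega⟩
            cases short with
            | none =>
              dsimp only [pvLtInf]
              rw [if_pos rfl, if_pos rfl]
              exact ih (i + 1) _ _ _ _ _ _ _ hInvUp
            | some S =>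
              dsimp only [pvLtInf]
              by_cases hq' : i - s + 1 < S
              · rw [if_pos (decide_eq_true hq'), if_pos (decide_eq_true hq')]
                exact ih (i + 1) _ _ _ _ _ _ _ hInvUp
              · rw [if_neg (by simp [hq']), if_neg (by simp [hq'])]
                refine ih (i + 1) res (latest.set (t' + 1) i)
                  (lens.set (t' + 1) (some (i - s + 1))) (some S) best (some S) _
                  ⟨hres, rfl, by simp [hlat], by simp [hlen], by simp [hP], by omega,
                   hBnd', hlast', hspec', hmono', ?_⟩
                intro L hklpos hL
                rw [show kl - 1 = t' + 1 from by omega,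
                  pvGetD_set_eq lens (t' + 1) _ none (by omega)] at hL
                injection hL with hL
                exact ⟨S, rfl, by omega⟩
          · -- a fresh length for an intermediate keyword
            have hendcn : ¬ (some ((t' + 1 : Nat) : Int) = some ((kl : Int) - 1)) := by
              intro hc; injection hc with hc; omega
            rw [if_neg hendcn]
            simp only [decide_eq_false
              (by omega : ¬ (((t' + 1 : Nat) : Int) = (kl : Int) - 1)),
              Bool.false_and, Bool.false_eq_true, if_false]
            refine ih (i + 1) res (latest.set (t' + 1) i)
              (lens.set (t' + 1) (some (i - s + 1))) short best short _
              ⟨hres, rfl, by simp [hlat], by simp [hlen], by simp [hP], by omega,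
               hBnd', hlast', hspec', hmono', ?_⟩
            intro L hklpos hL
            rw [pvGetD_set_ne lens (t' + 1) (kl - 1) _ none (by omega)] at hL
            exact hstale L hklpos hL

lemma pvEmptyDict (w : String) : (pvKeywordsToIdx []).get? w = none := by
  rfl

lemma pvAloopEmpty (d : PySem.Dict String Int) (nk : Int) (hd : ∀ w, d.get? w = none) :
    ∀ (ws : List String) (i : Int) (res : Int × Int) latest lens short,
    pvAloop d nk ws i res latest lens short = res := by
  intro ws
  induction ws with
  | nil => intro i res latest lens short; rfl
  | cons w ws ih =>
    intro i res latest lens short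
    simp only [pvAloop, hd w]
    exact ih (i + 1) res latest lens short

lemma pvGetD_replicate {α : Type} (n : Nat) (v d : α) (u : Nat) :
    (List.replicate n v).getD u d = if u < n then v else d := by
  rcases Nat.lt_or_ge u n with h | h
  · simp [List.getD_eq_getElem?_getD, h]
  · simp [List.getD_eq_getElem?_getD, Nat.not_lt.mpr h]

-- ===== VERDICT (by name: the statement is the Claim_ definition above) =====
theorem find_smallest_sequentially_covering_subset_spec : Claim_equal_find_smallest_sequentially_covering_subset := by
  intro paragraph keywords _
  unfold Spec_find_smallest_sequentially_covering_subset
    find_smallest_sequentially_covering_subset find_smallest_sequentially_covering_subset_alt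
  dsimp only
  by_cases hk0 : keywords.length = 0
  · rw [if_pos hk0]
    obtain rfl : keywords = [] := List.length_eq_zero_iff.mp hk0
    exact pvAloopEmpty (pvKeywordsToIdx []) _ (fun w => pvEmptyDict w) paragraph 0 (-1, -1) _ _ _
  · rw [if_neg hk0]
    have hd := pvDictVals keywords
    have hkl1 : 0 < keywords.length := by omega
    rw [show ((keywords.length : Int) - 1) = ((keywords.length - 1 : Nat) : Int) from by omega,
      PySem.List.pyGetD_natCast]
    rw [pvBuildPos_ends (pvKeywordsToIdx keywords) keywords.length hkl1 hd paragraph 0 _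
      le_rfl (by simp)]
    have hre : (List.replicate keywords.length ([] : List Int)).getD
        (keywords.length - 1) [] = [] := by
      rw [pvGetD_replicate]; split_ifs <;> rfl
    rw [hre, List.nil_append]
    refine pvMain (pvKeywordsToIdx keywords) keywords.length hd paragraph 0 (-1, -1) _ _ none
      (-1, -1) none _ ⟨rfl, rfl, by simp, by simp, by simp, le_rfl, ?_, ?_, ?_, ?_, ?_⟩
    · intro u x hx
      rw [pvGetD_replicate] at hx
      split_ifs at hx <;> simp at hx
    · intro u hu p hp
      rw [pvGetD_replicate] at hp
      split_ifs at hp <;> simp at hp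
    · intro u hu
      rw [pvGetD_replicate]
      unfold pvSpecLen
      rw [pvGetD_replicate]
      split_ifs <;> rfl
    · intro u hu h1
      rw [pvGetD_replicate] at h1
      split_ifs at h1 <;> simp at h1
    · intro L hpos hL
      rw [pvGetD_replicate] at hL
      split_ifs at hL
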